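-- pv_equiv track=rewrite | github.com/dietriro/GeoPro | geopro/functions/places_feature_matching.py | leave_longest_types
-- ===== SOURCE A (Python) =====
-- from typing import List, Tuple, TextIO
--
-- TypeStrings = List[str]
--
-- def leave_longest_types(matched_types: List[TypeStrings]) -> List[TypeStrings]:
--     """
--     Replicates C++ LeaveLongestTypes logic exactly.
--
--     If first 2 (or 1 for short types) components are equal,
--     only the longest types are kept.
--     Equal-length types are preserved.
--     """
--
--     def equal_prefix(lhs: TypeStrings, rhs: TypeStrings) -> bool:
--         prefix_size = min(len(lhs), len(rhs))
--         compare_len = min(2, prefix_size)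
--         return lhs[:compare_len] == rhs[:compare_len]
--
--     result: List[TypeStrings] = []
--
--     for t in matched_types:
--         keep = True
--         to_remove = []
--
--         for existing in result:
--             if equal_prefix(t, existing):
--                 if len(t) > len(existing):
--                     # New one is better → remove shorter existing
--                     to_remove.append(existing)
--                 elif len(t) < len(existing):
--                     # Existing one is better → discard new
--                     keep = False
--                     break
--                 else:
--                     # Same length → keep both
--                     pass
--
--         if keep:
--             for r in to_remove:
--                 result.remove(r)
--             result.append(t)
--
--     return result
-- ===== SOURCE B (Python) =====
-- from typing import List
--
-- TypeStrings = List[str]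
--
-- def leave_longest_types(matched_types: List[TypeStrings]) -> List[TypeStrings]:
--     """One pass to index the max length per first-two-element key (and the set of
--     first elements of multi-element types), then an O(1) keep test per type."""
--     maxlen = {}          # (t[0], t[1]) -> max length among types with that prefix and len >= 2
--     firsts = set()       # first elements of types with len >= 2
--     any_nonempty = False
--     for t in matched_types:
--         if len(t) >= 2:
--             key = (t[0], t[1])
--             if len(t) > maxlen.get(key, 0):
--                 maxlen[key] = len(t)
--             firsts.add(t[0])
--         if t:
--             any_nonempty = True
--
--     def keep(t: TypeStrings) -> bool:
--         if len(t) >= 2: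
--             return len(t) == maxlen.get((t[0], t[1]), 0)
--         elif len(t) == 1:
--             return t[0] not in firsts
--         else:
--             return not any_nonempty
--
--     return [t for t in matched_types if keep(t)]
-- ===== Notes on version B (the rewrite author's own statement) =====
-- stated objective: faster
-- what changed: Replaces the quadratic insert/remove-into-result loop by one indexing pass (max length per first-two-element key, set of first elements, any-nonempty flag) followed by an O(1) keep test per type.
import Mathlib
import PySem

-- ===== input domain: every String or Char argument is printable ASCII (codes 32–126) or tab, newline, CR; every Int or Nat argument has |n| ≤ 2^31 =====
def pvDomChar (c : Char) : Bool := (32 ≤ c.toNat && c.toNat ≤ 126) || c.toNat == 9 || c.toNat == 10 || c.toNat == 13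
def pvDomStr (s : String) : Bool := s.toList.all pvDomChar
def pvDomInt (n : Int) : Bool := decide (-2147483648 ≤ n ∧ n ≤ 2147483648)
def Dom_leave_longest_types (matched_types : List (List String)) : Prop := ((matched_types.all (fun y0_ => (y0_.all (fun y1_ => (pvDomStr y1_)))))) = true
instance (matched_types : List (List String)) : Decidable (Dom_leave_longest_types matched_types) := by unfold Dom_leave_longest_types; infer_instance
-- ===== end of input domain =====

-- B replaces A's quadratic insert/remove loop by one indexing pass (max length per
-- first-two-element key, set of first elements, any-nonempty flag) and an O(1) keep test per type.

-- ===== PORT A =====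
-- equal_prefix(lhs, rhs)
def pvEqualPrefix (lhs rhs : List String) : Bool :=
  let prefixSize := min lhs.length rhs.length
  let compareLen := min 2 prefixSize
  PySem.List.slice lhs none (some (compareLen : Int)) ==
    PySem.List.slice rhs none (some (compareLen : Int))

-- the inner 'for existing in result' loop: returns (keep, to_remove)
def pvInnerA (t : List String) : List (List String) → List (List String) → Bool × List (List String)
  | [], toRemove => (true, toRemove)
  | e :: rest, toRemove =>
    if pvEqualPrefix t e then
      if t.length > e.length then pvInnerA t rest (toRemove ++ [e])
      else if t.length < e.length then (false, toRemove)   -- keep = False; break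
      else pvInnerA t rest toRemove
    else pvInnerA t rest toRemove

-- the body of the outer loop; result.remove(r) never raises here (r was collected from result),
-- so the total '.getD' form is exact
def pvStepA (res : List (List String)) (t : List String) : List (List String) :=
  let kr := pvInnerA t res []   -- (keep, to_remove)
  if kr.1 then
    (kr.2.foldl (fun r e => (PySem.List.remove? r e).getD r) res) ++ [t]
  else res

def leave_longest_types (matched_types : List (List String)) : List (List String) :=
  matched_types.foldl pvStepA []

-- ===== PORT B =====
-- first pass: (maxlen dict, firsts set, any_nonempty flag)
def pvStepB (st : PySem.Dict (String × String) Int × PySem.Set String × Bool)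
    (t : List String) : PySem.Dict (String × String) Int × PySem.Set String × Bool :=
  let (d, s, ne) := st
  let (d, s) :=
    match t with
    | a :: b :: _ =>
        (if (t.length : Int) > d.getD (a, b) 0 then d.insert (a, b) (t.length : Int) else d,
         PySem.Set.add s a)
    | _ => (d, s)
  (d, s, ne || !t.isEmpty)

-- keep(t)
def pvKeepB (d : PySem.Dict (String × String) Int) (s : PySem.Set String) (ne : Bool)
    (t : List String) : Bool :=
  match t with
  | a :: b :: _ => (t.length : Int) == d.getD (a, b) 0
  | [_a] => ! PySem.Set.contains s _a
  | [] => ! ne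

def leave_longest_types_alt (matched_types : List (List String)) : List (List String) :=
  let st := matched_types.foldl pvStepB (PySem.Dict.empty, PySem.Set.empty, false)
  matched_types.filter (pvKeepB st.1 st.2.1 st.2.2)

-- ===== PRECONDITION & SPEC =====
def Spec_leave_longest_types (matched_types : List (List String)) (out : List (List String)) : Prop := out = leave_longest_types_alt matched_types
instance (matched_types : List (List String)) (out : List (List String)) : Decidable (Spec_leave_longest_types matched_types out) := by unfold Spec_leave_longest_types; infer_instance

-- ===== CLAIM (what is proved, stated in full; the proofs are below) =====
def Claim_equal_leave_longest_types : Prop := ∀ (matched_types : List (List String)), Dom_leave_longest_types matched_types → Spec_leave_longest_types matched_types (leave_longest_types matched_types)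

-- ===== LEMMAS AND PROOFS =====

-- 'u beats t': u shares the compared prefix with t and is strictly longer
def pvBeats (t u : List String) : Bool := pvEqualPrefix t u && decide (t.length < u.length)

-- the common specification: keep exactly the types no element of the whole list beats
def pvWins (l : List (List String)) : List (List String) :=
  l.filter (fun t => ! l.any (fun u => pvBeats t u))

lemma ep_eq_take (t u : List String) :
    pvEqualPrefix t u =
      (t.take (min 2 (min t.length u.length)) == u.take (min 2 (min t.length u.length))) := by
  simp only [pvEqualPrefix, PySem.List.slice_to_natCast]

lemma bool_eq_of_iff {a b : Bool} (h : a = true ↔ b = true) : a = b := by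
  cases a <;> cases b <;> simp_all

lemma ep_symm (t u : List String) : pvEqualPrefix t u = pvEqualPrefix u t := by
  rw [ep_eq_take, ep_eq_take, min_comm t.length]
  apply bool_eq_of_iff
  simp only [beq_iff_eq]
  exact eq_comm

lemma ep_trans {t u w : List String} (h1 : pvEqualPrefix t u = true)
    (h2 : pvEqualPrefix u w = true) (l1 : t.length < u.length) (l2 : u.length < w.length) :
    pvEqualPrefix t w = true := by
  rw [ep_eq_take] at *
  simp only [beq_iff_eq] at *
  have e1 : min 2 (min t.length u.length) = min 2 t.length := by omega
  have e2 : min 2 (min u.length w.length) = min 2 u.length := by omega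
  have e3 : min 2 (min t.length w.length) = min 2 t.length := by omega
  rw [e1] at h1; rw [e2] at h2; rw [e3]
  have hk : min 2 t.length ≤ min 2 u.length := by omega
  calc t.take (min 2 t.length) = u.take (min 2 t.length) := h1
    _ = (u.take (min 2 u.length)).take (min 2 t.length) := by
        rw [List.take_take, min_eq_left hk]
    _ = (w.take (min 2 u.length)).take (min 2 t.length) := by rw [h2]
    _ = w.take (min 2 t.length) := by rw [List.take_take, min_eq_left hk]

lemma beats_trans {t u w : List String} (h1 : pvBeats t u = true) (h2 : pvBeats u w = true) :
    pvBeats t w = true := by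
  simp only [pvBeats, Bool.and_eq_true, decide_eq_true_eq] at *
  exact ⟨ep_trans h1.1 h2.1 h1.2 h2.2, by omega⟩

lemma mem_wins {l : List (List String)} {x : List String} :
    x ∈ pvWins l ↔ x ∈ l ∧ ∀ u ∈ l, pvBeats x u = false := by
  simp [pvWins, List.mem_filter]

-- ---- A = pvWins ----

lemma innerA_keep_true {t : List String} :
    ∀ (res acc : List (List String)), (∀ u ∈ res, pvBeats t u = false) →
      pvInnerA t res acc =
        (true, acc ++ res.filter (fun e => pvEqualPrefix t e && decide (e.length < t.length))) := by
  intro res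
  induction res with
  | nil => intro acc _; simp [pvInnerA]
  | cons e rest ih =>
    intro acc h
    have he : pvBeats t e = false := h e (by simp)
    have hrest : ∀ u ∈ rest, pvBeats t u = false := fun u hu => h u (by simp [hu])
    simp only [pvInnerA]
    by_cases hep : pvEqualPrefix t e = true
    · have hlen : ¬ t.length < e.length := by
        intro hl; simp [pvBeats, hep, hl] at he
      rcases Nat.lt_trichotomy e.length t.length with hl | hl | hl
      · simp only [hep, if_true, if_pos hl]
        rw [ih _ hrest]
        simp [hep, hl]
      · simp only [hep, if_true]
        rw [if_neg (by omega), if_neg (by omega)]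
        rw [ih _ hrest]
        simp [hep, show ¬ e.length < t.length by omega]
      · exact absurd hl hlen
    · simp only [Bool.not_eq_true] at hep
      simp only [hep, Bool.false_eq_true, if_false]
      rw [ih _ hrest]
      simp [hep]

lemma innerA_keep_false {t : List String} :
    ∀ (res acc : List (List String)), (∃ u ∈ res, pvBeats t u = true) →
      (pvInnerA t res acc).1 = false := by
  intro res
  induction res with
  | nil => intro acc h; simp at h
  | cons e rest ih =>
    intro acc h
    simp only [pvInnerA]
    by_cases hep : pvEqualPrefix t e = true
    · rcases Nat.lt_trichotomy e.length t.length with hl | hl | hl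
      · simp only [hep, if_true, if_pos hl]
        apply ih
        rcases h with ⟨u, hu, hb⟩
        rcases List.mem_cons.mp hu with rfl | hu'
        · exfalso; simp only [pvBeats, Bool.and_eq_true, decide_eq_true_eq] at hb; omega
        · exact ⟨u, hu', hb⟩
      · simp only [hep, if_true]
        rw [if_neg (by omega), if_neg (by omega)]
        apply ih
        rcases h with ⟨u, hu, hb⟩
        rcases List.mem_cons.mp hu with rfl | hu'
        · exfalso; simp only [pvBeats, Bool.and_eq_true, decide_eq_true_eq] at hb; omega
        · exact ⟨u, hu', hb⟩
      · simp [hep, show ¬ t.length > e.length by omega, hl]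
    · simp only [Bool.not_eq_true] at hep
      simp only [hep, Bool.false_eq_true, if_false]
      apply ih
      rcases h with ⟨u, hu, hb⟩
      rcases List.mem_cons.mp hu with rfl | hu'
      · simp [pvBeats, hep] at hb
      · exact ⟨u, hu', hb⟩

-- sequentially remove-first each collected element: removes exactly the matching occurrences
lemma removeFold_cons {g : List String → Bool} {a : List String} (hga : g a = false) :
    ∀ (rs res : List (List String)), (∀ x ∈ rs, g x = true) →
      rs.foldl (fun r e => (PySem.List.remove? r e).getD r) (a :: res) =
        a :: rs.foldl (fun r e => (PySem.List.remove? r e).getD r) res := by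
  intro rs
  induction rs with
  | nil => intro res _; rfl
  | cons x rest ih =>
    intro res h
    have hax : a ≠ x := by
      intro rfl'; rw [rfl', h x (by simp)] at hga; cases hga
    simp only [List.foldl_cons]
    rw [PySem.List.remove?_cons_of_ne res hax]
    cases hr : PySem.List.remove? res x with
    | none => simp only [Option.map_none, Option.getD_none]
              exact ih res (fun y hy => h y (by simp [hy]))
    | some l => simp only [Option.map_some, Option.getD_some]
                exact ih l (fun y hy => h y (by simp [hy]))

lemma removeFold_filter (g : List String → Bool) :
    ∀ (res : List (List String)),
      (res.filter g).foldl (fun r e => (PySem.List.remove? r e).getD r) res =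
        res.filter (fun e => ! g e) := by
  intro res
  induction res with
  | nil => rfl
  | cons a rest ih =>
    by_cases hg : g a = true
    · simp only [List.filter_cons, hg, if_true, List.foldl_cons,
        PySem.List.remove?_cons_self, Option.getD_some]
      rw [ih]
      simp only [Bool.not_true, Bool.false_eq_true, if_false]
    · simp only [Bool.not_eq_true] at hg
      simp only [List.filter_cons, hg, Bool.false_eq_true, if_false]
      rw [removeFold_cons hg _ rest (fun x hx => (List.mem_filter.mp hx).2)]
      rw [ih]
      simp only [Bool.not_false, if_true]

-- a maximal-length beater of t in p is itself unbeaten in p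
lemma exists_wins_beater {p : List (List String)} {t u : List String}
    (hu : u ∈ p) (hb : pvBeats t u = true) :
    ∃ v ∈ pvWins p, pvBeats t v = true := by
  have hS : u ∈ p.filter (fun v => pvBeats t v) := List.mem_filter.mpr ⟨hu, hb⟩
  obtain ⟨m, hm⟩ : ∃ m, m ∈ (p.filter (fun v => pvBeats t v)).argmax (fun v => v.length) := by
    cases ha : (p.filter (fun v => pvBeats t v)).argmax (fun v => v.length) with
    | none => rw [List.argmax_eq_none] at ha; rw [ha] at hS; simp at hS
    | some m => exact ⟨m, rfl⟩
  have hmS := List.argmax_mem hm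
  have hmp : m ∈ p := (List.mem_filter.mp hmS).1
  have hmb : pvBeats t m = true := (List.mem_filter.mp hmS).2
  refine ⟨m, mem_wins.mpr ⟨hmp, ?_⟩, hmb⟩
  intro w hw
  by_contra hbw
  simp only [Bool.not_eq_false] at hbw
  have htw : pvBeats t w = true := beats_trans hmb hbw
  have hwS : w ∈ p.filter (fun v => pvBeats t v) := List.mem_filter.mpr ⟨hw, htw⟩
  have := List.le_of_mem_argmax hwS hm
  simp only [pvBeats, Bool.and_eq_true, decide_eq_true_eq] at hbw
  omega

lemma stepA_wins (p : List (List String)) (t : List String) :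
    pvStepA (pvWins p) t = pvWins (p ++ [t]) := by
  have hbt : pvBeats t t = false := by
    simp [pvBeats]
  by_cases hk : ∃ u ∈ pvWins p, pvBeats t u = true
  · -- discarded: nothing changes
    obtain ⟨u, huw, hub⟩ := hk
    have hup : u ∈ p := (mem_wins.mp huw).1
    simp only [pvStepA]
    rw [innerA_keep_false (pvWins p) [] ⟨u, huw, hub⟩]
    simp only [Bool.false_eq_true, if_false]
    unfold pvWins
    rw [List.filter_append]
    have ht : (! (p ++ [t]).any (fun v => pvBeats t v)) = false := by
      simp only [Bool.not_eq_false', List.any_eq_true]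
      exact ⟨u, by simp [hup], hub⟩
    simp only [List.filter_cons, ht, Bool.false_eq_true, if_false, List.filter_nil,
      List.append_nil]
    apply List.filter_congr
    intro e he
    by_cases hpe : p.any (fun v => pvBeats e v) = true
    · simp [List.any_append, hpe]
    · have hf : p.any (fun v => pvBeats e v) = false := by simpa using hpe
      have hpe' := List.any_eq_false.mp hf
      have hne : pvBeats e t = false := by
        by_contra hbet
        simp only [Bool.not_eq_false] at hbet
        exact hpe' u hup (beats_trans hbet hub)
      simp [List.any_append, hne, hf]
  · -- kept: remove the shorter prefix-equal winners, append t
    have hk' : ∀ u ∈ pvWins p, pvBeats t u = false := by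
      intro u hu
      by_contra h
      simp only [Bool.not_eq_false] at h
      exact hk ⟨u, hu, h⟩
    have hkp : ∀ u ∈ p, pvBeats t u = false := by
      intro u hu
      by_contra h
      simp only [Bool.not_eq_false] at h
      obtain ⟨v, hvw, hvb⟩ := exists_wins_beater hu h
      rw [hk' v hvw] at hvb; cases hvb
    simp only [pvStepA]
    rw [innerA_keep_true (pvWins p) [] hk']
    simp only [List.nil_append, if_true]
    rw [removeFold_filter]
    have ht' : (! (p ++ [t]).any (fun v => pvBeats t v)) = true := by
      simp only [Bool.not_eq_true', List.any_eq_false]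
      intro v hv
      rcases List.mem_append.mp hv with hv | hv
      · simp [hkp v hv]
      · rcases List.mem_singleton.mp hv with rfl
        simp [hbt]
    have hR : pvWins (p ++ [t]) =
        p.filter (fun e => (! p.any (fun v => pvBeats e v)) && ! pvBeats e t) ++ [t] := by
      unfold pvWins
      rw [List.filter_append]
      congr 1
      · apply List.filter_congr
        intro e _
        simp [List.any_append, Bool.not_or]
      · simp only [List.filter_cons, List.filter_nil]
        rw [ht']
        simp
    rw [hR]
    congr 1
    unfold pvWins
    rw [List.filter_filter]
    apply List.filter_congr
    intro e _
    have hsym : pvEqualPrefix t e = pvEqualPrefix e t := ep_symm t e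
    rw [show (! pvBeats e t) = (! (pvEqualPrefix t e && decide (e.length < t.length))) by
      unfold pvBeats; rw [hsym]]
    rw [Bool.and_comm]

lemma foldA_wins : ∀ (rest p : List (List String)),
    rest.foldl pvStepA (pvWins p) = pvWins (p ++ rest) := by
  intro rest
  induction rest with
  | nil => intro p; simp
  | cons t r ih =>
    intro p
    simp only [List.foldl_cons]
    rw [stepA_wins p t, ih (p ++ [t])]
    simp

lemma A_eq_wins (l : List (List String)) : leave_longest_types l = pvWins l := by
  have : pvWins ([] : List (List String)) = [] := rfl
  unfold leave_longest_types
  rw [← this, foldA_wins l []]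
  simp

-- ---- B = pvWins ----

-- the first-two-element key of a type, when it has one
def pvKey (t : List String) : Option (String × String) :=
  match t with
  | a :: b :: _ => some (a, b)
  | _ => none

-- running maximum of the lengths of the key-k elements, seeded by m0
def pvFmax (l : List (List String)) (k : String × String) (m0 : Int) : Int :=
  l.foldl (fun m t => if pvKey t = some k then max m (t.length : Int) else m) m0

lemma stepB_getD (d : PySem.Dict (String × String) Int) (s : PySem.Set String) (ne : Bool)
    (t : List String) (k : String × String) :
    ((pvStepB (d, s, ne) t).1).getD k 0 =
      if pvKey t = some k then max (d.getD k 0) (t.length : Int) else d.getD k 0 := by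
  match t with
  | [] => simp [pvStepB, pvKey]
  | [a] => simp [pvStepB, pvKey]
  | a :: b :: r =>
    simp only [pvStepB, pvKey, Option.some.injEq]
    by_cases hgt : (((a :: b :: r).length : Int) > d.getD (a, b) 0)
    · rw [if_pos hgt, PySem.Dict.getD_insert]
      by_cases hk : k = (a, b)
      · subst hk
        rw [if_pos rfl, if_pos rfl]
        rw [gt_iff_lt] at hgt
        omega
      · rw [if_neg hk, if_neg (fun h => hk h.symm)]
    · rw [if_neg hgt]
      by_cases hk : (a, b) = k
      · cases hk
        rw [if_pos rfl]
        rw [gt_iff_lt, not_lt] at hgt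
        omega
      · rw [if_neg hk]

lemma foldB_dict : ∀ (l : List (List String)) (d : PySem.Dict (String × String) Int)
    (s : PySem.Set String) (ne : Bool) (k : String × String),
    ((l.foldl pvStepB (d, s, ne)).1).getD k 0 = pvFmax l k (d.getD k 0) := by
  intro l
  induction l with
  | nil => intro d s ne k; rfl
  | cons t rest ih =>
    intro d s ne k
    simp only [List.foldl_cons]
    rcases hstep : pvStepB (d, s, ne) t with ⟨d', s', ne'⟩
    rw [ih d' s' ne' k]
    have hd' : d'.getD k 0 =
        if pvKey t = some k then max (d.getD k 0) (t.length : Int) else d.getD k 0 := by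
      rw [← stepB_getD d s ne t k, hstep]
    rw [hd']
    simp only [pvFmax, List.foldl_cons]

lemma foldB_set : ∀ (l : List (List String)) (d : PySem.Dict (String × String) Int)
    (s : PySem.Set String) (ne : Bool) (x : String),
    (x ∈ (l.foldl pvStepB (d, s, ne)).2.1) ↔
      (x ∈ s ∨ ∃ t ∈ l, ∃ b r, t = x :: b :: r) := by
  intro l
  induction l with
  | nil => intro d s ne x; simp
  | cons t rest ih =>
    intro d s ne x
    simp only [List.foldl_cons, pvStepB]
    match t with
    | [] => rw [ih]; simp
    | [a] =>
      rw [ih]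
      constructor
      · rintro (h | h)
        · exact Or.inl h
        · exact Or.inr (by obtain ⟨u, hu, b, r, rfl⟩ := h; exact ⟨_, by simp [hu], b, r, rfl⟩)
      · rintro (h | ⟨u, hu, b, r, rfl⟩)
        · exact Or.inl h
        · rcases List.mem_cons.mp hu with h1 | h1
          · cases h1
          · exact Or.inr ⟨_, h1, b, r, rfl⟩
    | a :: b :: r =>
      rw [ih]
      rw [PySem.Set.mem_add]
      constructor
      · rintro ((h | rfl) | h)
        · exact Or.inl h
        · exact Or.inr ⟨_, by simp, b, r, rfl⟩
        · exact Or.inr (by obtain ⟨u, hu, b', r', rfl⟩ := h; exact ⟨_, by simp [hu], b', r', rfl⟩)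
      · rintro (h | ⟨u, hu, b', r', rfl⟩)
        · exact Or.inl (Or.inl h)
        · rcases List.mem_cons.mp hu with h1 | h1
          · injection h1 with h2 h3; exact Or.inl (Or.inr h2)
          · exact Or.inr ⟨_, h1, b', r', rfl⟩

lemma foldB_ne : ∀ (l : List (List String)) (d : PySem.Dict (String × String) Int)
    (s : PySem.Set String) (ne : Bool),
    (l.foldl pvStepB (d, s, ne)).2.2 = (ne || l.any (fun t => !t.isEmpty)) := by
  intro l
  induction l with
  | nil => intro d s ne; simp
  | cons t rest ih =>
    intro d s ne
    simp only [List.foldl_cons, pvStepB]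
    match t with
    | [] => rw [ih]; simp
    | [a] => rw [ih]; simp
    | a :: b :: r => rw [ih]; simp

lemma fmax_le : ∀ (l : List (List String)) (k : String × String) (m0 : Int),
    m0 ≤ pvFmax l k m0 ∧ ∀ u ∈ l, pvKey u = some k → (u.length : Int) ≤ pvFmax l k m0 := by
  intro l
  induction l with
  | nil => intro k m0; exact ⟨le_refl _, by simp⟩
  | cons t rest ih =>
    intro k m0
    simp only [pvFmax, List.foldl_cons]
    by_cases hk : pvKey t = some k
    · rw [if_pos hk]
      obtain ⟨h1, h2⟩ := ih k (max m0 (t.length : Int))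
      refine ⟨le_trans (le_max_left _ _) h1, ?_⟩
      intro u hu hku
      rcases List.mem_cons.mp hu with rfl | hu'
      · exact le_trans (le_max_right _ _) h1
      · exact h2 u hu' hku
    · rw [if_neg hk]
      obtain ⟨h1, h2⟩ := ih k m0
      refine ⟨h1, ?_⟩
      intro u hu hku
      rcases List.mem_cons.mp hu with rfl | hu'
      · exact absurd hku hk
      · exact h2 u hu' hku

lemma fmax_mem : ∀ (l : List (List String)) (k : String × String) (m0 : Int),
    pvFmax l k m0 = m0 ∨ ∃ u ∈ l, pvKey u = some k ∧ pvFmax l k m0 = (u.length : Int) := by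
  intro l
  induction l with
  | nil => intro k m0; exact Or.inl rfl
  | cons t rest ih =>
    intro k m0
    simp only [pvFmax, List.foldl_cons]
    by_cases hk : pvKey t = some k
    · rw [if_pos hk]
      rcases ih k (max m0 (t.length : Int)) with h | ⟨u, hu, hku, he⟩
      · rcases max_cases m0 (t.length : Int) with ⟨h1, _⟩ | ⟨h1, _⟩
        · exact Or.inl (by rw [pvFmax] at h; rw [h, h1])
        · exact Or.inr ⟨t, by simp, hk, by rw [pvFmax] at h; rw [h, h1]⟩
      · exact Or.inr ⟨u, by simp [hu], hku, he⟩
    · rw [if_neg hk]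
      rcases ih k m0 with h | ⟨u, hu, hku, he⟩
      · exact Or.inl h
      · exact Or.inr ⟨u, by simp [hu], hku, he⟩

-- prefix comparisons by shape
lemma ep_cons2 (a b x y : String) (r s : List String) :
    pvEqualPrefix (a :: b :: r) (x :: y :: s) = ((a == x) && (b == y)) := by
  rw [ep_eq_take]
  have h : min 2 (min (a :: b :: r).length ((x :: y :: s).length)) = 2 := by
    simp only [List.length_cons]; omega
  rw [h]
  simp [List.take_succ_cons]

lemma ep_cons1 (a x : String) (s : List String) :
    pvEqualPrefix [a] (x :: s) = (a == x) := by
  rw [ep_eq_take]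
  have h : min 2 (min [a].length ((x :: s).length)) = 1 := by
    simp only [List.length_cons, List.length_nil]; omega
  rw [h]
  simp [List.take_succ_cons]

-- beat characterizations by shape of t
lemma beats_nil (u : List String) : pvBeats [] u = !u.isEmpty := by
  cases u with
  | nil => simp [pvBeats]
  | cons x r => simp [pvBeats, ep_eq_take]

lemma beats_single (a : String) (u : List String) :
    pvBeats [a] u = match u with
      | x :: _ :: _ => x == a
      | _ => false := by
  match u with
  | [] => simp [pvBeats]
  | [x] => simp [pvBeats]
  | x :: y :: r =>
    simp only [pvBeats, ep_cons1]
    have hlen : decide ([a].length < (x :: y :: r).length) = true := by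
      simp only [List.length_cons, List.length_nil, decide_eq_true_eq]; omega
    rw [hlen, Bool.and_true]
    apply bool_eq_of_iff
    simp only [beq_iff_eq]
    exact eq_comm

lemma beats_long (a b : String) (r : List String) (u : List String) :
    pvBeats (a :: b :: r) u =
      (decide (pvKey u = some (a, b)) && decide ((a :: b :: r).length < u.length)) := by
  match u with
  | [] => simp [pvBeats, pvKey]
  | [x] =>
    have h : decide ((a :: b :: r).length < ([x] : List String).length) = false := by
      simp only [List.length_cons, List.length_nil, decide_eq_false_iff_not]; omega
    simp [pvBeats, pvKey]
  | x :: y :: s =>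
    rw [show pvKey (x :: y :: s) = some (x, y) from rfl]
    simp only [pvBeats, ep_cons2]
    apply bool_eq_of_iff
    simp only [Bool.and_eq_true, beq_iff_eq, decide_eq_true_eq, Option.some.injEq,
      Prod.mk.injEq]
    constructor
    · rintro ⟨⟨h1, h2⟩, h3⟩; exact ⟨⟨h1.symm, h2.symm⟩, h3⟩
    · rintro ⟨⟨h1, h2⟩, h3⟩; exact ⟨⟨h1.symm, h2.symm⟩, h3⟩

lemma B_eq_wins (l : List (List String)) : leave_longest_types_alt l = pvWins l := by
  unfold leave_longest_types_alt pvWins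
  apply List.filter_congr
  intro t ht
  set st := l.foldl pvStepB (PySem.Dict.empty, PySem.Set.empty, false) with hst
  match t with
  | [] =>
    simp only [pvKeepB]
    rw [hst, foldB_ne]
    simp only [Bool.false_or]
    congr 1
    exact List.any_congr rfl (fun u => (beats_nil u).symm)
  | [a] =>
    simp only [pvKeepB]
    congr 1
    apply bool_eq_of_iff
    rw [PySem.Set.contains_iff]
    rw [hst, foldB_set]
    simp only [PySem.Set.empty, List.not_mem_nil, false_or]  -- a ∈ Set.empty is a ∈ []
    constructor
    · rintro ⟨u, hu, b, r, rfl⟩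
      exact List.any_eq_true.mpr ⟨_, hu, by rw [beats_single]; simp⟩
    · intro h
      obtain ⟨u, hu, hb⟩ := List.any_eq_true.mp h
      rw [beats_single] at hb
      match u, hb with
      | x :: y :: r, hb =>
        exact ⟨_, hu, y, r, by rw [beq_iff_eq] at hb; rw [hb]⟩
  | a :: b :: r =>
    simp only [pvKeepB]
    have hd : st.1.getD (a, b) 0 = pvFmax l (a, b) 0 := by
      rw [hst, foldB_dict]
      simp [PySem.Dict.getD_empty]
    have hkt : pvKey (a :: b :: r) = some (a, b) := rfl
    have hle : ((a :: b :: r).length : Int) ≤ pvFmax l (a, b) 0 :=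
      (fmax_le l (a, b) 0).2 _ ht hkt
    apply bool_eq_of_iff
    rw [hd, beq_iff_eq]
    constructor
    · intro he
      rw [Bool.not_eq_true', List.any_eq_false]
      intro u hu
      rw [beats_long]
      simp only [Bool.and_eq_true, decide_eq_true_eq]
      rintro ⟨hku, hlt⟩
      have hub := (fmax_le l (a, b) 0).2 u hu hku
      rw [← he] at hub
      simp only [List.length_cons] at *
      omega
    · intro h
      rw [Bool.not_eq_true', List.any_eq_false] at h
      rcases fmax_mem l (a, b) 0 with h0 | ⟨u, hu, hku, he⟩
      · rw [h0] at hle; simp only [List.length_cons] at hle; omega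
      · have hnb := h u hu
        rw [beats_long] at hnb
        simp only [Bool.and_eq_true, decide_eq_true_eq, not_and] at hnb
        have h3 := hnb hku
        have h2 := (fmax_le l (a, b) 0).2 u hu hku
        rw [he]
        simp only [List.length_cons] at *
        omega

-- ===== VERDICT (by name: the statement is the Claim_ definition above) =====
theorem leave_longest_types_spec : Claim_equal_leave_longest_types := by
  intro l _
  unfold Spec_leave_longest_types
  rw [A_eq_wins, B_eq_wins]
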